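-- pv_equiv track=rewrite | github.com/wjddns0122/code-tree | 251128/함수를 이용한 369 게임/369-games-using-functions.py | is_369
-- ===== SOURCE A (Python) =====
-- def is_369(n):
--     # 1) 3의 배수이면 바로 True
--     if n % 3 == 0:
--         return True
--
--     # 2) 각 자리 수에 3, 6, 9가 있는지 확인
--     while n > 0:
--         digit = n % 10       # 가장 오른쪽 자리
--         if digit in (3, 6, 9):
--             return True
--         n //= 10             # 한 자리 줄이기
--
--     return False             # 위에 안 걸리면 False
-- ===== SOURCE B (Python) =====
-- # Precompute which two-digit chunks 0..99 contain a 3, 6 or 9, then scan n two digits at a time.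
-- _HAS369 = frozenset(x for x in range(100) if x % 10 in (3, 6, 9) or x // 10 in (3, 6, 9))
--
-- def is_369(n):
--     if n % 3 == 0:
--         return True
--     while n > 0:
--         if n % 100 in _HAS369:
--             return True
--         n //= 100
--     return False
-- ===== Notes on version B (the rewrite author's own statement) =====
-- stated objective: alternative
-- what changed: Instead of peeling one digit per iteration and testing it against (3,6,9), B precomputes once a frozenset lookup table of the two-digit chunks 0..99 that contain a 3/6/9 digit and scans the number two digits (n % 100, n //= 100) per iteration against that table, halving the loop length.
import Mathlib
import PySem

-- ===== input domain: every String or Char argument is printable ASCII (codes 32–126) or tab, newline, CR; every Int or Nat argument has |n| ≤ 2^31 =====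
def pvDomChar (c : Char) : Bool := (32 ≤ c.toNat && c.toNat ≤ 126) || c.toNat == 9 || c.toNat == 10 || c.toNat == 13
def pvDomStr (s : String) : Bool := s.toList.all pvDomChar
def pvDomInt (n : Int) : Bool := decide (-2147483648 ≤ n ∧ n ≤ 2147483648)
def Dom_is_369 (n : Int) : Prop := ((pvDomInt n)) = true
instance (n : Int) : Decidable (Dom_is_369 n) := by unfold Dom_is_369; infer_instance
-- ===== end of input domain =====

-- B replaces A's one-digit-per-iteration peel with a precomputed lookup table of the two-digit chunks 0..99 containing a 3/6/9, scanned two digits at a time (alternative algorithm; return value only).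


-- ===== PORT A =====
-- the 'while n > 0' single-digit loop of A, transcribed as structural recursion on n.toNat
def is369Loop (n : Int) : Bool :=
  if _h : 0 < n then
    let digit := PySem.Int.mod n 10
    if digit = 3 ∨ digit = 6 ∨ digit = 9 then true
    else is369Loop (PySem.Int.floordiv n 10)
  else false
termination_by n.toNat
decreasing_by
  simp only [PySem.Int.floordiv_eq_ediv_of_pos (by norm_num : (0:Int) < 10)]
  omega

def is_369 (n : Int) : Bool :=
  if PySem.Int.mod n 3 = 0 then true
  else is369Loop n

-- ===== PORT B =====
-- _HAS369 = frozenset(x for x in range(100) if x % 10 in (3,6,9) or x // 10 in (3,6,9))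
def has369Table : PySem.Set Int :=
  PySem.Set.ofList ((PySem.List.pyRange 0 100 1).filter
    (fun x => decide (PySem.Int.mod x 10 = 3 ∨ PySem.Int.mod x 10 = 6 ∨ PySem.Int.mod x 10 = 9) ||
              decide (PySem.Int.floordiv x 10 = 3 ∨ PySem.Int.floordiv x 10 = 6 ∨ PySem.Int.floordiv x 10 = 9)))

-- the 'while n > 0' two-digit-chunk loop of B
def altLoop (n : Int) : Bool :=
  if _h : 0 < n then
    if has369Table.contains (PySem.Int.mod n 100) then true
    else altLoop (PySem.Int.floordiv n 100)
  else false
termination_by n.toNat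
decreasing_by
  simp only [PySem.Int.floordiv_eq_ediv_of_pos (by norm_num : (0:Int) < 100)]
  omega

def is_369_alt (n : Int) : Bool :=
  if PySem.Int.mod n 3 = 0 then true
  else altLoop n

-- ===== PRECONDITION & SPEC =====
def Spec_is_369 (n : Int) (out : Bool) : Prop := out = is_369_alt n
instance (n : Int) (out : Bool) : Decidable (Spec_is_369 n out) := by unfold Spec_is_369; infer_instance

-- ===== CLAIM (what is proved, stated in full; the proofs are below) =====
def Claim_equal_is_369 : Prop := ∀ (n : Int), Dom_is_369 n → Spec_is_369 n (is_369 n)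

-- ===== LEMMAS AND PROOFS =====

-- a Nat digit is 3/6/9, as a Bool
def d369 (r : Nat) : Bool := r = 3 || r = 6 || r = 9

set_option maxRecDepth 10000 in
lemma table_mem : ∀ (k : Nat), k < 100 →
    has369Table.contains ((k : Int)) = (d369 (k % 10) || d369 (k / 10)) := by decide

lemma is369Loop_natCast (m : Nat) :
    is369Loop (m : Int) = (if 0 < m then d369 (m % 10) || is369Loop ((m / 10 : Nat) : Int) else false) := by
  rw [is369Loop]
  by_cases hm : 0 < m
  · rw [dif_pos (show (0:Int) < (m:Int) by exact_mod_cast hm), if_pos hm]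
    have hmod : PySem.Int.mod (m : Int) 10 = ((m % 10 : Nat) : Int) := PySem.Int.mod_natCast m 10
    have hdiv : PySem.Int.floordiv (m : Int) 10 = ((m / 10 : Nat) : Int) := PySem.Int.floordiv_natCast m 10
    rw [hmod, hdiv]
    by_cases hd : d369 (m % 10) = true
    · have hp : ((m % 10 : Nat) : Int) = 3 ∨ ((m % 10 : Nat) : Int) = 6 ∨ ((m % 10 : Nat) : Int) = 9 := by
        simp only [d369, Bool.or_eq_true, decide_eq_true_eq] at hd
        rcases hd with (h | h) | h <;> simp [h]
      rw [if_pos hp, hd]; simp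
    · have hp : ¬(((m % 10 : Nat) : Int) = 3 ∨ ((m % 10 : Nat) : Int) = 6 ∨ ((m % 10 : Nat) : Int) = 9) := by
        simp only [d369, Bool.or_eq_true, decide_eq_true_eq] at hd
        push Not at hd
        intro h
        rcases h with h | h | h <;> omega
      rw [if_neg hp]
      simp only [Bool.not_eq_true] at hd
      rw [hd]; simp
  · have hm' : ¬(0:Int) < (m:Int) := by exact_mod_cast hm
    rw [dif_neg hm', if_neg hm]

lemma altLoop_natCast (m : Nat) :
    altLoop (m : Int) = (if 0 < m then (has369Table.contains ((m % 100 : Nat) : Int) || altLoop ((m / 100 : Nat) : Int)) else false) := by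
  rw [altLoop]
  by_cases hm : 0 < m
  · rw [dif_pos (show (0:Int) < (m:Int) by exact_mod_cast hm), if_pos hm]
    have hmod : PySem.Int.mod (m : Int) 100 = ((m % 100 : Nat) : Int) := PySem.Int.mod_natCast m 100
    have hdiv : PySem.Int.floordiv (m : Int) 100 = ((m / 100 : Nat) : Int) := PySem.Int.floordiv_natCast m 100
    rw [hmod, hdiv]
    by_cases ht : has369Table.contains ((m % 100 : Nat) : Int) = true
    · rw [if_pos ht, ht]; simp
    · rw [if_neg ht]
      simp only [Bool.not_eq_true] at ht
      rw [ht]; simp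
  · have hm' : ¬(0:Int) < (m:Int) := by exact_mod_cast hm
    rw [dif_neg hm', if_neg hm]

lemma loops_eq (m : Nat) : altLoop (m : Int) = is369Loop (m : Int) := by
  induction m using Nat.strong_induction_on with
  | _ m ih =>
    rw [altLoop_natCast, is369Loop_natCast]
    by_cases hm : 0 < m
    · rw [if_pos hm, if_pos hm]
      rw [table_mem (m % 100) (Nat.mod_lt m (by norm_num))]
      rw [ih (m / 100) (Nat.div_lt_self hm (by norm_num))]
      rw [is369Loop_natCast (m / 10)]
      have h1 : m % 100 % 10 = m % 10 := Nat.mod_mod_of_dvd m (by norm_num)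
      have h2 : m % 100 / 10 = m / 10 % 10 := by omega
      have h3 : m / 100 = m / 10 / 10 := by omega
      rw [h1, h2, h3]
      by_cases h10 : 0 < m / 10
      · rw [if_pos h10]
        cases d369 (m % 10) <;> cases d369 (m / 10 % 10) <;> simp
      · rw [if_neg h10]
        have : m / 10 % 10 = 0 := by omega
        rw [this]
        have hloop : is369Loop ((m / 10 / 10 : Nat) : Int) = false := by
          have : m / 10 / 10 = 0 := by omega
          rw [this]
          rw [is369Loop_natCast]; simp
        rw [hloop]
        simp [d369]
    · rw [if_neg hm, if_neg hm]

-- ===== VERDICT (by name: the statement is the Claim_ definition above) =====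
theorem is_369_spec : Claim_equal_is_369 := by
  intro n _
  unfold Spec_is_369 is_369 is_369_alt
  by_cases h3 : PySem.Int.mod n 3 = 0
  · rw [if_pos h3, if_pos h3]
  · rw [if_neg h3, if_neg h3]
    by_cases hn : 0 < n
    · have hcast : n = ((n.toNat : Nat) : Int) := by omega
      rw [hcast, loops_eq]
    · rw [is369Loop, dif_neg hn, altLoop, dif_neg hn]
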